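-- pv_equiv track=rewrite | github.com/balta2ar/srs-toolbelt | yatetradki/korean/memrise_sync.py | load_string_with_words
-- ===== SOURCE A (Python) =====
-- from collections import OrderedDict, namedtuple
--
-- MARK_COMMENT = '@'
--
-- MARK_LEVEL_NAME = '#'
--
-- class WordCollection(OrderedDict):
--     def __str__(self):
--         lines = []
--
--         for level_name, word_pairs in self.items():
--             lines.append('\n# %s\n' % level_name)
--             for pair in word_pairs:
--                 lines.append('%s; %s' % (pair.word, pair.meaning))
--         return '\n'.join(lines)
--
-- WordPair = namedtuple('WordPair', 'word meaning')
--
-- def load_string_with_words(words_string):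
--     # key: level name
--     # value: [(word, meaning)]
--     words = WordCollection()
--     current_level = None
--     lines = words_string.split('\n')
--     for line in (l.strip() for l in lines if l.strip()):
--         if line.startswith(MARK_COMMENT):
--             continue
--
--         if line.startswith(MARK_LEVEL_NAME):
--             line = line[1:].strip()
--             current_level = line
--             if current_level not in words:
--                 words[current_level] = []
--             continue
--
--         if current_level is None:
--             raise ValueError('Please specify level name before any words')
--
--         try:
--             word, meaning = line.split(';', maxsplit=1)
--         except ValueError as e:
--             raise ValueError('Invalid line format, <word>;<meaning> '
--                              'expected, got %s: %s' % (line, e))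
--
--         word = word.strip()
--         meaning = meaning.strip()
--         words[current_level].append(WordPair(word, meaning))
--
--     return words
-- ===== SOURCE B (Python) =====
-- # Two-phase re-implementation: group stripped lines into a leading block plus
-- # (header, body) sections first, then build the dict section by section.
--
-- def _sections(lines):
--     if not lines:
--         return []
--     j = 1
--     while j < len(lines) and not lines[j].startswith('#'):
--         j += 1
--     return [(lines[0], lines[1:j])] + _sections(lines[j:])
--
-- def _split_sections(lines):
--     k = 0
--     while k < len(lines) and not lines[k].startswith('#'):
--         k += 1
--     return lines[:k], _sections(lines[k:])
--
-- def _parse_body(body):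
--     pairs = []
--     for line in body:
--         if not line.startswith('@'):
--             word, meaning = line.split(';', maxsplit=1)
--             pairs.append((word.strip(), meaning.strip()))
--     return pairs
--
-- def load_string_with_words(words_string):
--     lines = [s for s in (l.strip() for l in words_string.split('\n')) if s]
--     lead, sections = _split_sections(lines)
--     for line in lead:
--         if not line.startswith('@'):
--             raise ValueError('Please specify level name before any words')
--     result = {}
--     for header, body in sections:
--         level = header[1:].strip()
--         result.setdefault(level, [])
--         result[level] = result[level] + _parse_body(body)
--     return result
-- ===== Notes on version B (the rewrite author's own statement) =====
-- stated objective: alternative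
-- what changed: B replaces A's single pass with a mutable current_level by a two-phase decomposition: it first groups the stripped lines into a leading block plus (header, body) sections, then builds the dict one section at a time (setdefault + extend with the parsed body).
import Mathlib
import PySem

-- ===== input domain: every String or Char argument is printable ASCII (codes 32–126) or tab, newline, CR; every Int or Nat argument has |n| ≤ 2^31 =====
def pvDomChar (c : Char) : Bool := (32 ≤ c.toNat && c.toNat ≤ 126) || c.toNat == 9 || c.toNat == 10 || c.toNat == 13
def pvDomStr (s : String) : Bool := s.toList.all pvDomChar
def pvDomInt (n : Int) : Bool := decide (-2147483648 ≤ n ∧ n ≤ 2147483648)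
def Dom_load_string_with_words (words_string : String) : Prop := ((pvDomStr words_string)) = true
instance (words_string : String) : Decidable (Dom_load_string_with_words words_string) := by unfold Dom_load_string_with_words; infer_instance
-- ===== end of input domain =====

-- B groups the stripped lines into header sections first, then builds the dict section by
-- section (same return value on Pre_; both versions raise ValueError outside Pre_).

-- ===== PORT A =====
-- A's loop body (one stripped non-empty line; state = (words dict, current_level)).
def pvStepA (st : PySem.Dict String (List (String × String)) × Option String) (line : String) :
    PySem.Dict String (List (String × String)) × Option String :=
  if PySem.Str.startswith line "@" then st
  else if PySem.Str.startswith line "#" then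
    let lvl := PySem.Str.strip (String.ofList (PySem.List.slice line.toList (some 1) none))
    let d := if st.1.contains lvl then st.1 else st.1.insert lvl []
    (d, some lvl)
  else
    match st.2 with
    | none => st      -- Python raises ValueError ('specify level name') here; outside Pre_
    | some lvl =>
      match PySem.Str.splitMax? line ";" 1 with
      | some [w, m] => (st.1.modify lvl [] (· ++ [(PySem.Str.strip w, PySem.Str.strip m)]), st.2)
      | _ => st       -- Python raises ValueError (line without ';'); outside Pre_

def load_string_with_words (words_string : String) : List (String × List (String × String)) :=
  let lines := (PySem.Chars.splitOn words_string.toList ['\n']).map String.ofList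
  let stripped := (lines.filter (fun l => PySem.Str.strip l ≠ "")).map PySem.Str.strip
  (stripped.foldl pvStepA (PySem.Dict.empty, none)).1.items

-- ===== PORT B =====
-- _sections: a header line followed by its body (all lines up to the next header).
def pvSections : List String → List (String × List String)
  | [] => []
  | h :: rest =>
    (h, rest.takeWhile (fun l => !PySem.Str.startswith l "#")) ::
      pvSections (rest.dropWhile (fun l => !PySem.Str.startswith l "#"))
termination_by ls => ls.length
decreasing_by
  simpa using Nat.lt_succ_of_le (List.length_dropWhile_le _ _)

-- _parse_body
def pvParseBody (body : List String) : List (String × String) :=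
  body.filterMap (fun line =>
    if PySem.Str.startswith line "@" then none
    else
      match PySem.Str.splitMax? line ";" 1 with
      | some [w, m] => some (PySem.Str.strip w, PySem.Str.strip m)
      | _ => none)  -- Python raises ValueError (line without ';'); outside Pre_

-- B's per-section step: setdefault the level key, then extend its list with the parsed body.
def pvStepB (d : PySem.Dict String (List (String × String))) (sec : String × List String) :
    PySem.Dict String (List (String × String)) :=
  let lvl := PySem.Str.strip (String.ofList (PySem.List.slice sec.1.toList (some 1) none))
  (d.setdefault lvl []).modify lvl [] (· ++ pvParseBody sec.2)

def load_string_with_words_alt (words_string : String) : List (String × List (String × String)) :=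
  let lines := (((PySem.Chars.splitOn words_string.toList ['\n']).map String.ofList).map
      PySem.Str.strip).filter (fun s => s ≠ "")
  -- Python B raises ValueError on a non-'@' line in the leading block; outside Pre_ the lead
  -- group does not contribute to the returned value, so the port only processes the sections.
  let secs := pvSections (lines.dropWhile (fun l => !PySem.Str.startswith l "#"))
  (secs.foldl pvStepB PySem.Dict.empty).items

-- ===== PRECONDITION & SPEC =====
-- Pre_ = exactly the inputs on which Python A returns: every stripped non-empty line before the
-- first '#' header is an '@' comment, and every non-comment, non-header line contains a ';'.
def Pre_load_string_with_words (words_string : String) : Prop :=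
  (∀ l ∈ ((((PySem.Chars.splitOn words_string.toList ['\n']).map String.ofList).map
        PySem.Str.strip).filter (fun s => s ≠ "")).takeWhile
        (fun l => !PySem.Str.startswith l "#"),
      PySem.Str.startswith l "@" = true) ∧
  (∀ l ∈ (((PySem.Chars.splitOn words_string.toList ['\n']).map String.ofList).map
        PySem.Str.strip).filter (fun s => s ≠ ""),
      PySem.Str.startswith l "@" = true ∨ PySem.Str.startswith l "#" = true ∨
      PySem.Str.isIn ";" l = true)
instance (words_string : String) : Decidable (Pre_load_string_with_words words_string) := by
  unfold Pre_load_string_with_words; infer_instance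

def pvWitness_load_string_with_words : String :=
  "@ note\n# L1\nword ; meaning\n@ c\na;b\n# L2\nx; y"

def Spec_load_string_with_words (words_string : String) (out : List (String × List (String × String))) : Prop := out = load_string_with_words_alt words_string
instance (words_string : String) (out : List (String × List (String × String))) : Decidable (Spec_load_string_with_words words_string out) := by unfold Spec_load_string_with_words; infer_instance

-- ===== CLAIM (what is proved, stated in full; the proofs are below) =====
def Claim_equal_load_string_with_words : Prop := ∀ (words_string : String), Dom_load_string_with_words words_string → Pre_load_string_with_words words_string → Spec_load_string_with_words words_string (load_string_with_words words_string)

-- ===== LEMMAS AND PROOFS =====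

-- Re-inserting a key with its current value is a no-op (keys unique).
theorem pvInsert_getD_self (d : PySem.Dict String (List (String × String))) (k : String)
    (v0 : List (String × String)) (hnd : d.keys.Nodup) (h : d.get? k = some v0) :
    d.insert k v0 = d := by
  apply PySem.Dict.ext
  have hc : d.contains k = true := by
    rw [PySem.Dict.contains_eq_isSome_get?, h]; rfl
  rw [PySem.Dict.items_insert, if_pos hc]
  conv_rhs => rw [← List.map_id d.items]
  refine List.map_congr_left (fun p hp => ?_)
  by_cases hpk : p.1 == k
  · have h1 : d.get? p.1 = some p.2 := PySem.Dict.get?_of_mem_items d (by simpa using hp) hnd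
    have h2 : p.1 = k := by simpa using hpk
    rw [hpk, if_pos rfl]
    rw [h2, h] at h1
    obtain ⟨a, b⟩ := p
    simp_all
  · simp [hpk]

-- A's loop skips every line before the first header: comments are skipped, word lines hit the
-- current_level = none branch (a skip in the port, a ValueError in Python, outside Pre_).
theorem pvFoldA_lead (ls : List String) (d : PySem.Dict String (List (String × String)))
    (h : ∀ l ∈ ls, PySem.Str.startswith l "#" = false) :
    ls.foldl pvStepA (d, none) = (d, none) := by
  induction ls with
  | nil => rfl
  | cons l t ih =>
    have hl := h l (List.mem_cons_self ..)
    have ht := fun x hx => h x (List.mem_cons_of_mem _ hx)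
    simp only [List.foldl_cons]
    have hstep : pvStepA (d, none) l = (d, none) := by
      unfold pvStepA
      by_cases ha : PySem.Str.startswith l "@" = true
      · rw [if_pos ha]
      · rw [if_neg ha, if_neg (by simpa using hl)]
    rw [hstep]; exact ih ht

-- A's loop over a header's body extends the level's list with the parsed body, in one step.
theorem pvFoldA_body (body : List String) (d : PySem.Dict String (List (String × String)))
    (lvl : String) (hnd : d.keys.Nodup) (hc : d.contains lvl = true)
    (h : ∀ l ∈ body, PySem.Str.startswith l "#" = false) :
    body.foldl pvStepA (d, some lvl) = (d.modify lvl [] (· ++ pvParseBody body), some lvl) := by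
  induction body generalizing d with
  | nil =>
    have hv : ∃ v0, d.get? lvl = some v0 := by
      rw [PySem.Dict.contains_eq_isSome_get?] at hc
      exact Option.isSome_iff_exists.mp hc
    obtain ⟨v0, hv⟩ := hv
    have : d.modify lvl [] (· ++ pvParseBody []) = d := by
      show d.insert lvl (d.getD lvl [] ++ pvParseBody []) = d
      rw [PySem.Dict.getD_eq_get?_getD, hv]
      simpa [pvParseBody] using pvInsert_getD_self d lvl v0 hnd hv
    simp [this]
  | cons l t ih =>
    have hl := h l (List.mem_cons_self ..)
    have ht := fun x hx => h x (List.mem_cons_of_mem _ hx)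
    simp only [List.foldl_cons]
    by_cases ha : PySem.Str.startswith l "@" = true
    · have haC : PySem.Chars.startswith l.toList ['@'] = true := by simpa using ha
      have hstep : pvStepA (d, some lvl) l = (d, some lvl) := by
        unfold pvStepA; rw [if_pos ha]
      rw [hstep, ih d hnd hc ht]
      simp [pvParseBody, haC]
    · have haC : PySem.Chars.startswith l.toList ['@'] = false := by
        simpa using ha
      have hmod : ∀ p, (d.modify lvl [] (· ++ [p])).modify lvl [] (· ++ pvParseBody t)
          = d.modify lvl [] (· ++ (p :: pvParseBody t)) := by
        intro p
        simp only [PySem.Dict.modify, PySem.Dict.getD_insert_self,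
          PySem.Dict.insert_insert_self]
        simp
      have hnd' : ∀ p, (d.modify lvl [] (· ++ [p])).keys.Nodup := fun p =>
        PySem.Dict.nodup_keys_insert d lvl _ hnd
      have hc' : ∀ p, (d.modify lvl [] (· ++ [p])).contains lvl = true := by
        intro p; rw [PySem.Dict.contains_modify]; simp
      cases hsp : PySem.Str.splitMax? l ";" 1 with
      | none =>
        have hstep : pvStepA (d, some lvl) l = (d, some lvl) := by
          unfold pvStepA
          rw [if_neg ha, if_neg (by simpa using hl)]
          simp only [hsp]
        rw [hstep, ih d hnd hc ht]; simp [pvParseBody, haC, hsp]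
      | some parts =>
        match parts with
        | [] =>
          have hstep : pvStepA (d, some lvl) l = (d, some lvl) := by
            unfold pvStepA
            rw [if_neg ha, if_neg (by simpa using hl)]
            simp only [hsp]
          rw [hstep, ih d hnd hc ht]; simp [pvParseBody, haC, hsp]
        | [w] =>
          have hstep : pvStepA (d, some lvl) l = (d, some lvl) := by
            unfold pvStepA
            rw [if_neg ha, if_neg (by simpa using hl)]
            simp only [hsp]
          rw [hstep, ih d hnd hc ht]; simp [pvParseBody, haC, hsp]
        | [w, m] =>
          have hstep : pvStepA (d, some lvl) l =
              (d.modify lvl [] (· ++ [(PySem.Str.strip w, PySem.Str.strip m)]), some lvl) := by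
            unfold pvStepA
            rw [if_neg ha, if_neg (by simpa using hl)]
            simp only [hsp]
          rw [hstep, ih _ (hnd' _) (hc' _) ht, hmod]
          simp [pvParseBody, haC, hsp]
        | w :: m :: x :: r =>
          have hstep : pvStepA (d, some lvl) l = (d, some lvl) := by
            unfold pvStepA
            rw [if_neg ha, if_neg (by simpa using hl)]
            simp only [hsp]
          rw [hstep, ih d hnd hc ht]; simp [pvParseBody, haC, hsp]

-- A's loop over the part starting at the first header equals B's fold over the sections.
theorem pvFoldA_sections (n : Nat) : ∀ (ls : List String), ls.length ≤ n →
    ∀ (d : PySem.Dict String (List (String × String))) (cur : Option String),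
    d.keys.Nodup →
    (∀ h t, ls = h :: t → PySem.Str.startswith h "#" = true) →
    (ls.foldl pvStepA (d, cur)).1 = (pvSections ls).foldl pvStepB d := by
  induction n with
  | zero =>
    intro ls hlen d cur _ _
    have : ls = [] := List.length_eq_zero_iff.mp (Nat.le_zero.mp hlen)
    subst this; simp [pvSections]
  | succ n ih =>
    intro ls hlen d cur hnd hh
    cases ls with
    | nil => simp [pvSections]
    | cons h rest =>
      have hh1 : PySem.Str.startswith h "#" = true := hh h rest rfl
      set lvl := PySem.Str.strip (String.ofList (PySem.List.slice h.toList (some 1) none)) with hlvl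
      have hstep : pvStepA (d, cur) h =
          ((if d.contains lvl then d else d.insert lvl []), some lvl) := by
        unfold pvStepA
        have hnaC : PySem.Chars.startswith h.toList ['@'] = false := by
          cases hq : PySem.Chars.startswith h.toList ['@']
          · rfl
          · exfalso
            -- h starts with both '#' and '@' is impossible
            obtain ⟨t1, ht1⟩ := (PySem.Chars.startswith_iff _ _).mp (by simpa using hh1)
            obtain ⟨t2, ht2⟩ := (PySem.Chars.startswith_iff _ _).mp hq
            rw [← ht1] at ht2
            simp at ht2
        rw [if_neg (by simp [hnaC]), if_pos hh1]
      set d1 := (if d.contains lvl then d else d.insert lvl []) with hd1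
      have hd1sd : d1 = d.setdefault lvl [] := by
        rw [hd1]
        by_cases hcd : d.contains lvl = true
        · simp [hcd, PySem.Dict.setdefault]
        · apply PySem.Dict.ext
          simp only [Bool.not_eq_true] at hcd
          rw [if_neg (by simp [hcd]), PySem.Dict.items_insert_of_not_contains d [] hcd]
          simp [PySem.Dict.setdefault, hcd]
      have hnd1 : d1.keys.Nodup := by
        rw [hd1]
        by_cases hcd : d.contains lvl = true
        · simpa [hcd]
        · rw [if_neg (by simp_all)]
          exact PySem.Dict.nodup_keys_insert d lvl [] hnd
      have hc1 : d1.contains lvl = true := by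
        rw [hd1sd, PySem.Dict.contains_setdefault]; simp
      -- split the rest into the body and the remaining sections
      have hsplit : rest = rest.takeWhile (fun l => !PySem.Str.startswith l "#")
          ++ rest.dropWhile (fun l => !PySem.Str.startswith l "#") :=
        (List.takeWhile_append_dropWhile).symm
      have hbody : ∀ l ∈ rest.takeWhile (fun l => !PySem.Str.startswith l "#"),
          PySem.Str.startswith l "#" = false := by
        intro l hl
        have := List.mem_takeWhile_imp hl
        simpa using this
      have hrest' : ∀ h' t', rest.dropWhile (fun l => !PySem.Str.startswith l "#") = h' :: t' →
          PySem.Str.startswith h' "#" = true := by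
        intro h' t' he
        have hne : rest.dropWhile (fun l => !PySem.Str.startswith l "#") ≠ [] := by
          rw [he]; exact List.cons_ne_nil _ _
        have h2 := List.head_dropWhile_not (fun l => !PySem.Str.startswith l "#") hne
        simp only [he, List.head_cons] at h2
        simpa using h2
      have hlen' : (rest.dropWhile (fun l => !PySem.Str.startswith l "#")).length ≤ n := by
        have h1 := List.length_dropWhile_le (fun l => !PySem.Str.startswith l "#") rest
        have h2 : rest.length + 1 ≤ n + 1 := by simpa using hlen
        omega
      set d2 := d1.modify lvl [] (· ++ pvParseBody
        (rest.takeWhile (fun l => !PySem.Str.startswith l "#"))) with hd2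
      have hnd2 : d2.keys.Nodup := PySem.Dict.nodup_keys_insert d1 lvl _ hnd1
      calc ((h :: rest).foldl pvStepA (d, cur)).1
          = (rest.foldl pvStepA (d1, some lvl)).1 := by
            simp only [List.foldl_cons, hstep, hd1]
        _ = ((rest.dropWhile (fun l => !PySem.Str.startswith l "#")).foldl pvStepA
              (d2, some lvl)).1 := by
            conv_lhs => rw [hsplit]
            rw [List.foldl_append, pvFoldA_body _ d1 lvl hnd1 hc1 hbody]
        _ = (pvSections (rest.dropWhile (fun l => !PySem.Str.startswith l "#"))).foldl
              pvStepB d2 := ih _ hlen' d2 (some lvl) hnd2 hrest'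
        _ = (pvSections (h :: rest)).foldl pvStepB d := by
            rw [pvSections]
            simp only [List.foldl_cons]
            congr 1
            rw [pvStepB, hd2, hd1sd]

-- The two ports build the same stripped non-empty line list.
theorem pvStripFilter (l : List String) :
    (l.filter (fun x => PySem.Str.strip x ≠ "")).map PySem.Str.strip
      = (l.map PySem.Str.strip).filter (fun s => s ≠ "") := by
  induction l with
  | nil => rfl
  | cons x t ih =>
    by_cases hx : PySem.Str.strip x = "" <;> simp [hx] <;>
      simpa using ih

-- ===== VERDICT =====
theorem load_string_with_words_spec : Claim_equal_load_string_with_words := by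
  intro ws _ _
  unfold Spec_load_string_with_words load_string_with_words load_string_with_words_alt
  -- the two ports build the same stripped line list
  have hlines := pvStripFilter ((PySem.Chars.splitOn ws.toList ['\n']).map String.ofList)
  set ls := ((((PySem.Chars.splitOn ws.toList ['\n']).map String.ofList).map
    PySem.Str.strip).filter (fun s => s ≠ "")) with hls
  simp only [hlines]
  -- fold over the lead is a no-op, then the sections lemma
  have hlead : ∀ l ∈ ls.takeWhile (fun l => !PySem.Str.startswith l "#"),
      PySem.Str.startswith l "#" = false := by
    intro l hl
    have := List.mem_takeWhile_imp hl
    simpa using this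
  have hhead : ∀ h t, ls.dropWhile (fun l => !PySem.Str.startswith l "#") = h :: t →
      PySem.Str.startswith h "#" = true := by
    intro h t he
    have hne : ls.dropWhile (fun l => !PySem.Str.startswith l "#") ≠ [] := by
      rw [he]; exact List.cons_ne_nil _ _
    have h2 := List.head_dropWhile_not (fun l => !PySem.Str.startswith l "#") hne
    simp only [he, List.head_cons] at h2
    simpa using h2
  conv_lhs => rw [← List.takeWhile_append_dropWhile
    (p := fun l => !PySem.Str.startswith l "#") (l := ls)]
  rw [List.foldl_append, pvFoldA_lead _ _ hlead]
  rw [pvFoldA_sections (ls.dropWhile (fun l => !PySem.Str.startswith l "#")).length _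
    le_rfl _ none (by simp [PySem.Dict.keys_empty]) hhead]
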